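-- pv_equiv track=rewrite | github.com/AnastasiiaYank/KNU-python-2 | 24.7(HW20).py | separate_digits
-- ===== SOURCE A (Python) =====
-- def separate_digits(string):
--     digits = ""
--     non_digits = ""
--     for char in string:
--         if char.isdigit():
--             digits += char
--         else:
--             non_digits += char
--     return digits, non_digits
-- ===== SOURCE B (Python) =====
-- def separate_digits(string):
--     # Divide and conquer: split the string in half, separate each half
--     # recursively, and concatenate the two partial results in order.
--     if len(string) <= 1:
--         return (string, "") if string.isdigit() else ("", string)
--     mid = len(string) // 2
--     d1, n1 = separate_digits(string[:mid])
--     d2, n2 = separate_digits(string[mid:])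
--     return d1 + d2, n1 + n2
-- ===== Notes on version B (the rewrite author's own statement) =====
-- stated objective: alternative
-- what changed: Replaces A's single left-to-right loop with two mutable accumulators by a divide-and-conquer recursion: the string is split in half, each half is separated recursively, and the two partial (digits, non_digits) pairs are concatenated; correct because concatenating the partitions of two halves in order is the partition of the whole.
import Mathlib
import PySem

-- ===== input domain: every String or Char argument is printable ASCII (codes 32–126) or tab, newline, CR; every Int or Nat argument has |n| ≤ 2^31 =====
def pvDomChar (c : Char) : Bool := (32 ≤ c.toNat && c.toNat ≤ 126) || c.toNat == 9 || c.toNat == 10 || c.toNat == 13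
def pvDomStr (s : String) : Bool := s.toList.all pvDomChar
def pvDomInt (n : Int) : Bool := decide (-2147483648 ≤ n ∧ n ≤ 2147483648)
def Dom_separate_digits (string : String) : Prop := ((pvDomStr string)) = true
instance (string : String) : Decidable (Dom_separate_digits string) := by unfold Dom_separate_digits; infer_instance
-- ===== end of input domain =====

-- B replaces A's single accumulating loop by a divide-and-conquer recursion on string halves (alternative; same result).

-- ===== PORT A =====
-- one pass: for char in string: append to digits or non_digits
def separate_digits (string : String) : String × String :=
  string.toList.foldl
    (fun (acc : String × String) c =>
      if PySem.Chars.isdigit c then (acc.1.push c, acc.2) else (acc.1, acc.2.push c))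
    ("", "")

-- ===== PORT B =====
-- divide and conquer on the character list; string[:mid] / string[mid:] with
-- 0 <= mid <= len are exactly List.take / List.drop.  The fuel argument (set to
-- the list length at the top call) only makes the recursion structural; the
-- 0-fuel branch is never reached when fuel >= length.
def sdGo : Nat → List Char → List Char × List Char
  | 0, _ => ([], [])
  | fuel + 1, l =>
    if l.length ≤ 1 then
      -- Python: len ≤ 1 ⇒ (string, "") if string.isdigit() else ("", string);
      -- "".isdigit() is False, a one-char string's isdigit is the char's
      match l with
      | [] => ([], [])
      | c :: _ => if PySem.Chars.isdigit c then ([c], []) else ([], [c])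
    else
      let m := l.length / 2
      let p1 := sdGo fuel (l.take m)
      let p2 := sdGo fuel (l.drop m)
      (p1.1 ++ p2.1, p1.2 ++ p2.2)

def separate_digits_alt (string : String) : String × String :=
  let p := sdGo string.toList.length string.toList
  (String.ofList p.1, String.ofList p.2)

-- ===== PRECONDITION & SPEC =====
def Spec_separate_digits (string : String) (out : String × String) : Prop := out = separate_digits_alt string
instance (string : String) (out : String × String) : Decidable (Spec_separate_digits string out) := by unfold Spec_separate_digits; infer_instance

-- ===== CLAIM (what is proved, stated in full; the proofs are below) =====
def Claim_equal_separate_digits : Prop := ∀ (string : String), Dom_separate_digits string → Spec_separate_digits string (separate_digits string)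

-- ===== LEMMAS AND PROOFS =====

lemma sd_push (d : List Char) (c : Char) :
    (String.ofList d).push c = String.ofList (d ++ [c]) := by
  apply String.toList_injective; simp

-- A's loop produces the two filters of the suffix appended to the accumulators
lemma sd_loop (l d nd : List Char) :
    l.foldl
      (fun (acc : String × String) c =>
        if PySem.Chars.isdigit c then (acc.1.push c, acc.2) else (acc.1, acc.2.push c))
      (String.ofList d, String.ofList nd)
    = (String.ofList (d ++ l.filter (fun c => PySem.Chars.isdigit c)),
       String.ofList (nd ++ l.filter (fun c => !PySem.Chars.isdigit c))) := by
  induction l generalizing d nd with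
  | nil => simp
  | cons c l ih =>
    rw [List.foldl_cons]
    by_cases h : PySem.Chars.isdigit c = true <;>
      simp only [h, if_pos, if_neg, Bool.false_eq_true, not_false_eq_true,
        sd_push, ih, List.filter_cons, Bool.not_true, Bool.not_false] <;>
      simp [List.append_assoc]

-- B's divide and conquer also produces the two filters (given enough fuel)
lemma sdGo_eq (fuel : Nat) (l : List Char) (hf : l.length ≤ fuel) :
    sdGo fuel l = (l.filter (fun c => PySem.Chars.isdigit c),
                   l.filter (fun c => !PySem.Chars.isdigit c)) := by
  induction fuel generalizing l with
  | zero =>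
    have : l = [] := List.length_eq_zero_iff.mp (Nat.le_antisymm hf (Nat.zero_le _))
    subst this; rfl
  | succ fuel ih =>
    rw [sdGo.eq_def]; dsimp only
    by_cases h : l.length ≤ 1
    · rw [if_pos h]
      match l, h with
      | [], _ => simp
      | [c], _ => by_cases hc : PySem.Chars.isdigit c = true <;> simp [hc]
    · rw [if_neg h]
      have h2 : 2 ≤ l.length := by omega
      rw [ih (l.take (l.length / 2)) (by simp [List.length_take]; omega),
          ih (l.drop (l.length / 2)) (by simp [List.length_drop]; omega)]
      simp only
      rw [← List.filter_append, ← List.filter_append, List.take_append_drop]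

-- ===== VERDICT (by name: the statement is the Claim_ definition above) =====
theorem separate_digits_spec : Claim_equal_separate_digits := by
  intro s _
  unfold Spec_separate_digits separate_digits separate_digits_alt
  rw [sdGo_eq _ _ (le_refl _)]
  have h := sd_loop s.toList [] []
  simpa using h
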